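-- pv_equiv track=rewrite | github.com/jermenkoo/spoj.pl_solutions | TOANDFRO.py | to_fro
-- ===== SOURCE A (Python) =====
-- def to_fro(shift, string):
--     answer = ''
--     for i in range(shift):
--         for j in range(len(string) // shift):
--             if not (j & 1):
--                 answer += string[shift * j + i]
--             else:
--                 answer += string[shift * (j + 1) - 1 - i]
--     return answer
-- ===== SOURCE B (Python) =====
-- def to_fro(shift, string):
--     if shift <= 0:
--         return ''
--     rows = [string[k * shift:(k + 1) * shift] for k in range(len(string) // shift)]
--     rows = [r[::-1] if k & 1 else r for k, r in enumerate(rows)]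
--     return ''.join(r[i] for i in range(shift) for r in rows)
-- ===== Notes on version B (the rewrite author's own statement) =====
-- stated objective: simpler
-- what changed: B builds the grid explicitly: it slices the string into full rows of length shift, reverses the odd rows, and reads the grid column-major, replacing A's per-character parity index arithmetic inside nested loops.
import Mathlib
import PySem

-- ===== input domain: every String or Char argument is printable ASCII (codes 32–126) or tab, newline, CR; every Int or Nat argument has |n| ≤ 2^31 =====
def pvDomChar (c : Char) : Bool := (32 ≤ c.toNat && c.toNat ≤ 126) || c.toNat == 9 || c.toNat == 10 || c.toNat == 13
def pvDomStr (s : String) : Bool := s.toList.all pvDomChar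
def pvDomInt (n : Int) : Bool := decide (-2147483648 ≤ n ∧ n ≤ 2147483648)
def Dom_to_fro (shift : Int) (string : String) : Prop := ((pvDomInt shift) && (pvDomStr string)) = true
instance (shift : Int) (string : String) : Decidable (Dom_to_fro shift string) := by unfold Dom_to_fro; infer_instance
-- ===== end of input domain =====

-- B re-implements the decode as an explicit grid (slice full rows, reverse odd rows, read column-major)
-- instead of A's per-character parity index arithmetic; the two agree on every input (both are total).

-- ===== PORT A =====
def to_fro (shift : Int) (string : String) : String :=
  let s := string.toList
  String.ofList <|
    (PySem.List.pyRange 0 shift 1).foldl (fun answer i =>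
      (PySem.List.pyRange 0 (PySem.Int.floordiv (s.length : Int) shift) 1).foldl
        (fun answer j =>
          if PySem.Int.band j 1 = 0 then
            answer ++ [PySem.List.pyGetD s (shift * j + i) ' ']
          else
            answer ++ [PySem.List.pyGetD s (shift * (j + 1) - 1 - i) ' ']) answer) []

-- ===== PORT B =====
def to_fro_alt (shift : Int) (string : String) : String :=
  if shift ≤ 0 then "" else
    let s := string.toList
    let rows := (PySem.List.pyRange 0 (PySem.Int.floordiv (s.length : Int) shift) 1).map
        (fun k => PySem.List.slice s (some (k * shift)) (some ((k + 1) * shift)))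
    let rows2 := (PySem.List.enumerate rows 0).map
        (fun p => if PySem.Int.band p.1 1 = 0 then p.2 else p.2.reverse)
    String.ofList <|
      (PySem.List.pyRange 0 shift 1).flatMap
        (fun i => rows2.map (fun r => PySem.List.pyGetD r i ' '))

-- ===== PRECONDITION & SPEC =====
def Spec_to_fro (shift : Int) (string : String) (out : String) : Prop := out = to_fro_alt shift string
instance (shift : Int) (string : String) (out : String) : Decidable (Spec_to_fro shift string out) := by unfold Spec_to_fro; infer_instance

-- ===== CLAIM (what is proved, stated in full; the proofs are below) =====
def Claim_equal_to_fro : Prop := ∀ (shift : Int) (string : String), Dom_to_fro shift string → Spec_to_fro shift string (to_fro shift string)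

-- ===== LEMMAS AND PROOFS =====

theorem pv_band1 (j : Nat) : PySem.Int.band (j:Int) 1 = ((j % 2 : Nat) : Int) := by
  rw [PySem.Int.band_one]; exact_mod_cast PySem.Int.mod_natCast j 2

theorem pv_enum_map_range {α β : Type} (f : Nat → α) (g : Int × α → β) (n : Nat) :
    (PySem.List.enumerate ((List.range n).map f) 0).map g
      = (List.range n).map (fun (k : Nat) => g ((k : Int), f k)) := by
  apply List.ext_getElem
  · simp [PySem.List.length_enumerate]
  · intro k h1 h2
    simp [PySem.List.getElem_enumerate]

def pvF (s : List Char) (S i j : Nat) : Char :=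
  if j % 2 = 0 then PySem.List.pyGetD s ((S:Int)*(j:Int)+(i:Int)) ' '
  else PySem.List.pyGetD s ((S:Int)*((j:Int)+1)-1-(i:Int)) ' '

theorem pv_A_eq (S : Nat) (string : String) :
    to_fro (S:Int) string
      = String.ofList ((List.range S).flatMap (fun i =>
          (List.range (string.toList.length / S)).map (pvF string.toList S i))) := by
  unfold to_fro
  simp only [PySem.Int.floordiv_natCast, PySem.List.pyRange_zero_natCast, List.foldl_map]
  congr 1
  set s := string.toList with hs
  set n := s.length / S with hn
  calc (List.range S).foldl (fun (answer : List Char) (i : Nat) =>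
        (List.range n).foldl (fun (answer : List Char) (j : Nat) =>
          if PySem.Int.band (j:Int) 1 = 0 then
            answer ++ [PySem.List.pyGetD s ((S:Int) * (j:Int) + (i:Int)) ' ']
          else
            answer ++ [PySem.List.pyGetD s ((S:Int) * ((j:Int) + 1) - 1 - (i:Int)) ' ']) answer) []
      = (List.range S).foldl (fun (answer : List Char) (i : Nat) => answer ++ (List.range n).map (pvF s S i)) [] := by
        apply PySem.List.foldl_congr_mem
        intro acc i _
        calc (List.range n).foldl (fun (answer : List Char) (j : Nat) =>
              if PySem.Int.band (j:Int) 1 = 0 then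
                answer ++ [PySem.List.pyGetD s ((S:Int) * (j:Int) + (i:Int)) ' ']
              else
                answer ++ [PySem.List.pyGetD s ((S:Int) * ((j:Int) + 1) - 1 - (i:Int)) ' ']) acc
            = (List.range n).foldl (fun (answer : List Char) (j : Nat) => answer ++ [pvF s S i j]) acc := by
              apply PySem.List.foldl_congr_mem
              intro a j _
              rw [pv_band1]
              have hj : j % 2 = 0 ∨ ((j % 2 : Nat) : Int) ≠ 0 := by omega
              rcases hj with h | h
              · simp [h, pvF]
              · rw [if_neg h, pvF, if_neg (by omega)]
          _ = acc ++ (List.range n).map (pvF s S i) :=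
              PySem.List.foldl_append_singleton_eq_map _ _ _
    _ = [] ++ (List.range S).flatMap (fun i => (List.range n).map (pvF s S i)) :=
        PySem.List.foldl_append_eq_flatMap _ _ _
    _ = _ := by simp

theorem pv_cell (s : List Char) (S i k : Nat) (hi : i < S) (hk : k < s.length / S) :
    PySem.List.pyGetD (if k % 2 = 0 then (s.drop (k*S)).take S else ((s.drop (k*S)).take S).reverse) (i:Int) ' '
      = pvF s S i k := by
  have hfit : k * S + S ≤ s.length := by
    calc k * S + S = (k+1) * S := by ring
      _ ≤ (s.length / S) * S := Nat.mul_le_mul_right _ (by omega)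
      _ ≤ s.length := Nat.div_mul_le_self s.length S
  have hlen : ((s.drop (k*S)).take S).length = S := by
    simp only [List.length_take, List.length_drop]
    omega
  rw [PySem.List.pyGetD_natCast]
  by_cases h : k % 2 = 0
  · rw [if_pos h, pvF, if_pos h]
    have hidx : ((S:Int) * (k:Int) + (i:Int)) = ((k*S + i : Nat) : Int) := by push_cast; ring
    rw [hidx, PySem.List.pyGetD_natCast]
    rw [List.getD_eq_getElem?_getD, List.getD_eq_getElem?_getD,
        List.getElem?_take_of_lt hi, List.getElem?_drop]
  · rw [if_neg h, pvF, if_neg h]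
    have hsub : ((S - 1 - i : Nat) : Int) = (S:Int) - 1 - (i:Int) := by omega
    have hidx : ((S:Int) * ((k:Int)+1) - 1 - (i:Int)) = ((k*S + (S-1-i) : Nat) : Int) := by
      rw [Nat.cast_add, hsub]; push_cast; ring
    rw [hidx, PySem.List.pyGetD_natCast, List.getD_eq_getElem?_getD, List.getD_eq_getElem?_getD]
    rw [List.getElem?_reverse (by rw [hlen]; omega), hlen]
    rw [List.getElem?_take_of_lt (by omega), List.getElem?_drop]

theorem pv_B_eq (S : Nat) (hS : 0 < S) (string : String) :
    to_fro_alt (S:Int) string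
      = String.ofList ((List.range S).flatMap (fun i =>
          (List.range (string.toList.length / S)).map (pvF string.toList S i))) := by
  unfold to_fro_alt
  rw [if_neg (by omega)]
  simp only [PySem.Int.floordiv_natCast, PySem.List.pyRange_zero_natCast, List.map_map]
  set s := string.toList with hs
  set n := s.length / S with hn
  have hrow : (List.range n).map (fun (k : Nat) =>
        PySem.List.slice s (some ((k:Int) * (S:Int))) (some (((k:Int) + 1) * (S:Int))))
      = (List.range n).map (fun (k : Nat) => (s.drop (k*S)).take S) := by
    apply List.map_congr_left
    intro k _
    have h1 : ((k:Int)*(S:Int)) = ((k*S : Nat) : Int) := by push_cast; ring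
    have h2 : (((k:Int)+1)*(S:Int)) = ((k*S : Nat) : Int) + ((S : Nat) : Int) := by push_cast; ring
    rw [h1, h2, PySem.List.slice_natCast_add]
  simp only [Function.comp_def, List.flatMap_map]
  apply congrArg
  apply List.flatMap_congr
  intro i hi
  rw [hrow, pv_enum_map_range (fun k => (s.drop (k*S)).take S)
      (fun p => PySem.List.pyGetD (if PySem.Int.band p.1 1 = 0 then p.2 else p.2.reverse) (i:Int) ' ') n]
  apply List.map_congr_left
  intro k hk
  rw [pv_band1]
  simp only [Nat.cast_eq_zero]
  exact pv_cell s S i k (List.mem_range.mp hi) (List.mem_range.mp hk)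

theorem to_fro_eq (shift : Int) (string : String) : to_fro shift string = to_fro_alt shift string := by
  by_cases hs : shift ≤ 0
  · have hr : PySem.List.pyRange 0 shift 1 = [] := by simp [PySem.List.pyRange]; omega
    unfold to_fro to_fro_alt
    rw [if_pos hs]
    simp only [hr, List.foldl_nil]
  · rw [Int.not_le] at hs
    obtain ⟨S, rfl⟩ : ∃ S : Nat, shift = (S:Int) := ⟨shift.toNat, (Int.toNat_of_nonneg hs.le).symm⟩
    rw [pv_A_eq, pv_B_eq S (by exact_mod_cast hs) string]

-- ===== VERDICT (by name: the statement is the Claim_ definition above) =====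
theorem to_fro_spec : Claim_equal_to_fro := by
  intro shift string _
  unfold Spec_to_fro
  exact to_fro_eq shift string
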